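-- pv_equiv track=rewrite | github.com/dataelement/bisheng | src/backend/bisheng/permission/domain/workflow_app_permission.py | default_app_permission_ids_for_relation
-- ===== SOURCE A (Python) =====
-- from typing import Dict, List, Optional, Set, Tuple
--
-- _RELATION_ORDER = {'can_read': 1, 'can_edit': 2, 'can_manage': 3, 'can_delete': 4}
--
-- _MODEL_ORDER = {'viewer': 1, 'editor': 2, 'manager': 3, 'owner': 4}
--
-- _COMPUTED_TO_MODEL_RELATION = {
--     'can_read': 'viewer',
--     'can_edit': 'editor',
--     'can_manage': 'manager',
--     'can_delete': 'owner',
-- }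
--
-- _APP_PERMISSION_DEFINITIONS: List[Tuple[str, str]] = [
--     ('view_app', 'can_read'),
--     ('use_app', 'can_read'),
--     ('edit_app', 'can_edit'),
--     ('delete_app', 'can_delete'),
--     ('publish_app', 'can_manage'),
--     ('unpublish_app', 'can_manage'),
--     ('share_app', 'can_manage'),
--     ('manage_app_owner', 'can_manage'),
--     ('manage_app_manager', 'can_manage'),
--     ('manage_app_viewer', 'can_manage'),
-- ]
--
-- def default_app_permission_ids_for_relation(relation: str) -> Set[str]:
--     """Default permission ids for a built-in FGA relation (viewer/editor/manager/owner)."""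
--     normalized = _COMPUTED_TO_MODEL_RELATION.get(relation or '', relation or '')
--     ml = _MODEL_ORDER.get(normalized, 0)
--     out: Set[str] = set()
--     for pid, req in _APP_PERMISSION_DEFINITIONS:
--         if ml >= _RELATION_ORDER.get(req, 99):
--             out.add(pid)
--     return out
-- ===== SOURCE B (Python) =====
-- # B: one precomputed table mapping every accepted relation spelling to its
-- # permission-id set; the function is a single dict lookup returning a fresh set.
--
-- _VIEWER = ('view_app', 'use_app')
-- _EDITOR = _VIEWER + ('edit_app',)
-- _MANAGE = ('publish_app', 'unpublish_app', 'share_app',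
--            'manage_app_owner', 'manage_app_manager', 'manage_app_viewer')
-- _MANAGER = _EDITOR + _MANAGE
-- _OWNER = _EDITOR + ('delete_app',) + _MANAGE
--
-- _DEFAULT_PERMISSION_TABLE = {
--     'viewer': _VIEWER, 'can_read': _VIEWER,
--     'editor': _EDITOR, 'can_edit': _EDITOR,
--     'manager': _MANAGER, 'can_manage': _MANAGER,
--     'owner': _OWNER, 'can_delete': _OWNER,
-- }
--
-- def default_app_permission_ids_for_relation(relation: str):
--     return set(_DEFAULT_PERMISSION_TABLE.get(relation, ()))
-- ===== Notes on version B (the rewrite author's own statement) =====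
-- stated objective: simpler
-- what changed: Replaces the two-stage normalization (computed->model relation, relation->rank) and the per-call loop over all ten permission definitions comparing ranks with a single precomputed relation->permission-set table and one dict lookup returning a fresh copy.
import Mathlib
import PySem

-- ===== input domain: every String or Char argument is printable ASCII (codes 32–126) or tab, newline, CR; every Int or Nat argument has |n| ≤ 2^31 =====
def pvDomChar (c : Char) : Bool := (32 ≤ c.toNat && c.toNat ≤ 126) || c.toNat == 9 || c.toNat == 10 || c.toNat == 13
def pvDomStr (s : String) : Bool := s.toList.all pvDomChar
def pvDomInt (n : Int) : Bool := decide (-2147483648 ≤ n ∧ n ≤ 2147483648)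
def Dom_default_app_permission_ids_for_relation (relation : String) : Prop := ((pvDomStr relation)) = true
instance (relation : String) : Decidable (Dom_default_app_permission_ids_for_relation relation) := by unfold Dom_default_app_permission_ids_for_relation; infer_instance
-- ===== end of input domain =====

-- B replaces A's normalization + rank loop by one precomputed relation->permission-set
-- table and a single lookup (objective: simpler).

-- ===== PORT A =====
def pvRelationOrder : PySem.Dict String Int :=
  PySem.Dict.ofList [("can_read", 1), ("can_edit", 2), ("can_manage", 3), ("can_delete", 4)]

def pvModelOrder : PySem.Dict String Int :=
  PySem.Dict.ofList [("viewer", 1), ("editor", 2), ("manager", 3), ("owner", 4)]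

def pvComputedToModel : PySem.Dict String String :=
  PySem.Dict.ofList
    [("can_read", "viewer"), ("can_edit", "editor"),
     ("can_manage", "manager"), ("can_delete", "owner")]

def pvAppPermissionDefinitions : List (String × String) :=
  [("view_app", "can_read"), ("use_app", "can_read"), ("edit_app", "can_edit"),
   ("delete_app", "can_delete"), ("publish_app", "can_manage"),
   ("unpublish_app", "can_manage"), ("share_app", "can_manage"),
   ("manage_app_owner", "can_manage"), ("manage_app_manager", "can_manage"),
   ("manage_app_viewer", "can_manage")]

def default_app_permission_ids_for_relation (relation : String) : List String :=
  -- `relation or ''` is `relation` itself when nonempty, '' otherwise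
  let r0 := if relation = "" then "" else relation
  let normalized := pvComputedToModel.getD r0 r0
  let ml := pvModelOrder.getD normalized 0
  pvAppPermissionDefinitions.foldl
    (fun out pr =>
      if pvRelationOrder.getD pr.2 99 ≤ ml then PySem.Set.add out pr.1 else out)
    (PySem.Set.empty : PySem.Set String)

-- ===== PORT B =====
def pvViewer : List String := ["view_app", "use_app"]
def pvEditor : List String := pvViewer ++ ["edit_app"]
def pvManage : List String :=
  ["publish_app", "unpublish_app", "share_app",
   "manage_app_owner", "manage_app_manager", "manage_app_viewer"]
def pvManager : List String := pvEditor ++ pvManage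
def pvOwner : List String := pvEditor ++ ["delete_app"] ++ pvManage

def pvDefaultPermissionTable : PySem.Dict String (List String) :=
  PySem.Dict.ofList
    [("viewer", pvViewer), ("can_read", pvViewer),
     ("editor", pvEditor), ("can_edit", pvEditor),
     ("manager", pvManager), ("can_manage", pvManager),
     ("owner", pvOwner), ("can_delete", pvOwner)]

def default_app_permission_ids_for_relation_alt (relation : String) : List String :=
  PySem.Set.ofList (pvDefaultPermissionTable.getD relation [])

-- ===== PRECONDITION & SPEC =====
def Spec_default_app_permission_ids_for_relation (relation : String) (out : List String) : Prop := out = default_app_permission_ids_for_relation_alt relation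
instance (relation : String) (out : List String) : Decidable (Spec_default_app_permission_ids_for_relation relation out) := by unfold Spec_default_app_permission_ids_for_relation; infer_instance

-- ===== CLAIM (what is proved, stated in full; the proofs are below) =====
def Claim_equal_default_app_permission_ids_for_relation : Prop := ∀ (relation : String), Dom_default_app_permission_ids_for_relation relation → Spec_default_app_permission_ids_for_relation relation (default_app_permission_ids_for_relation relation)

-- ===== LEMMAS AND PROOFS =====

-- ===== VERDICT (by name: the statement is the Claim_ definition above) =====
theorem default_app_permission_ids_for_relation_spec : Claim_equal_default_app_permission_ids_for_relation := by
  intro relation _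
  unfold Spec_default_app_permission_ids_for_relation
  by_cases h1 : relation = "viewer";   · subst h1; decide
  by_cases h2 : relation = "editor";   · subst h2; decide
  by_cases h3 : relation = "manager";  · subst h3; decide
  by_cases h4 : relation = "owner";    · subst h4; decide
  by_cases h5 : relation = "can_read"; · subst h5; decide
  by_cases h6 : relation = "can_edit"; · subst h6; decide
  by_cases h7 : relation = "can_manage"; · subst h7; decide
  by_cases h8 : relation = "can_delete"; · subst h8; decide
  have hr0 : (if relation = "" then "" else relation) = relation := by split <;> simp_all
  have ectm : pvComputedToModel.get? relation = none := by
    have hit : pvComputedToModel.items =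
        [("can_read", "viewer"), ("can_edit", "editor"),
         ("can_manage", "manager"), ("can_delete", "owner")] := by decide
    simp [PySem.Dict.get?, hit, Ne.symm h5, Ne.symm h6, Ne.symm h7, Ne.symm h8]
  have emo : pvModelOrder.get? relation = none := by
    have hit : pvModelOrder.items =
        [("viewer", 1), ("editor", 2), ("manager", 3), ("owner", 4)] := by decide
    simp [PySem.Dict.get?, hit, Ne.symm h1, Ne.symm h2, Ne.symm h3, Ne.symm h4]
  have etab : pvDefaultPermissionTable.get? relation = none := by
    have hit : pvDefaultPermissionTable.items =
        [("viewer", pvViewer), ("can_read", pvViewer), ("editor", pvEditor),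
         ("can_edit", pvEditor), ("manager", pvManager), ("can_manage", pvManager),
         ("owner", pvOwner), ("can_delete", pvOwner)] := by decide
    simp [PySem.Dict.get?, hit, Ne.symm h1, Ne.symm h2, Ne.symm h3, Ne.symm h4,
      Ne.symm h5, Ne.symm h6, Ne.symm h7, Ne.symm h8]
  have hcr : (pvRelationOrder.get? "can_read").getD 99 = 1 := by decide
  have hce : (pvRelationOrder.get? "can_edit").getD 99 = 2 := by decide
  have hcm : (pvRelationOrder.get? "can_manage").getD 99 = 3 := by decide
  have hcd : (pvRelationOrder.get? "can_delete").getD 99 = 4 := by decide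
  simp [default_app_permission_ids_for_relation, default_app_permission_ids_for_relation_alt,
    hr0, emo, etab, PySem.Dict.getD, ectm, hcr, hce, hcm, hcd,
    pvAppPermissionDefinitions, List.foldl]
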